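-- pv_equiv track=rewrite | github.com/JG3233/advent_of_code | 2024/day5/day5.py | determine_order
-- ===== SOURCE A (Python) =====
-- def determine_order(rules_dict, print_jobs):
--     correct_order   = []
--     incorrect_order = []
--     for job in print_jobs:
--         out_of_order = False
--         for page in range(len(job)):
--             next_pages = job[page:]
--             for next_page in next_pages:
--                 if next_page in rules_dict and job[page] in rules_dict[next_page]:
--                     out_of_order = True
--                     break
--             if out_of_order:
--                 break
--         if not out_of_order:
--             correct_order.append(job)
--         else:
--             incorrect_order.append(job)
--     return correct_order, incorrect_order
-- ===== SOURCE B (Python) =====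
-- def determine_order(rules_dict, print_jobs):
--     correct_order = []
--     incorrect_order = []
--     for job in print_jobs:
--         first_occ = {}
--         for idx, p in enumerate(job):
--             if p not in first_occ:
--                 first_occ[p] = idx
--         bad = any(
--             a in first_occ and first_occ[a] <= j
--             for j, p in enumerate(job)
--             for a in rules_dict.get(p, [])
--         )
--         (incorrect_order if bad else correct_order).append(job)
--     return correct_order, incorrect_order
-- ===== Notes on version B (the rewrite author's own statement) =====
-- stated objective: faster
-- what changed: Replaces A's triple-nested scan (each page sliced against all later pages, with a dict lookup and rule-list scan per pair) by a per-job first-occurrence index map consulted once per rules-list entry.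
import Mathlib
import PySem

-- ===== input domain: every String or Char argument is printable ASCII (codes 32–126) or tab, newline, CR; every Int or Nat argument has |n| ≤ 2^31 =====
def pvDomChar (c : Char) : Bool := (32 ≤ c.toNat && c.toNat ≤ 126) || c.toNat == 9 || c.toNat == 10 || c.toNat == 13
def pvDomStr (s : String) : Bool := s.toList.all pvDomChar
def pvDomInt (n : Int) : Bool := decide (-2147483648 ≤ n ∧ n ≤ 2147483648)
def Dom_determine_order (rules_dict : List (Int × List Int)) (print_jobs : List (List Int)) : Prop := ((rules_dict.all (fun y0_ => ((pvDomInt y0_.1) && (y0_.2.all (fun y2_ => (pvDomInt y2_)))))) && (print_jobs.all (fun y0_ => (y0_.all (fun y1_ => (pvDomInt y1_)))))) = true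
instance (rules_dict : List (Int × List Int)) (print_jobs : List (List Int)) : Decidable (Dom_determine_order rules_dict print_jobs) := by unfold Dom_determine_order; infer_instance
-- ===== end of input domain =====

-- B replaces A's scan of all (earlier page, later page) pairs by a first-occurrence
-- index map per job driven off the rules lists (alternative decomposition).

-- ===== PORT A =====
-- inner loop: 'for next_page in next_pages: if next_page in rules_dict and job[page] in rules_dict[next_page]: out_of_order = True; break'
def doInner (rules_dict : List (Int × List Int)) (cur : Int) (next_pages : List Int) : Bool :=
  match next_pages with
  | [] => false
  | next_page :: rest =>
    match rules_dict.lookup next_page with   -- 'next_page in rules_dict' / 'rules_dict[next_page]'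
    | some vs => if vs.contains cur then true else doInner rules_dict cur rest
    | none => doInner rules_dict cur rest

-- outer loop: 'for page in range(len(job)): … if out_of_order: break'
def doOuter (rules_dict : List (Int × List Int)) (job : List Int) (page : Nat) : Bool :=
  if h : page < job.length then
    -- next_pages = job[page:]; exact as List.drop since 0 ≤ page
    if doInner rules_dict job[page] (job.drop page) then true
    else doOuter rules_dict job (page + 1)
  else false
termination_by job.length - page

def determine_order (rules_dict : List (Int × List Int)) (print_jobs : List (List Int)) : List (List Int) × List (List Int) :=
  print_jobs.foldl
    (fun acc job =>
      let out_of_order := doOuter rules_dict job 0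
      if !out_of_order then (acc.1 ++ [job], acc.2) else (acc.1, acc.2 ++ [job]))
    ([], [])

-- ===== PORT B =====
-- first_occ: page ↦ its earliest index in job
def firstOcc (job : List Int) : PySem.Dict Int Int :=
  (PySem.List.enumerate job).foldl
    (fun d p => if d.contains p.2 then d else d.insert p.2 p.1) PySem.Dict.empty

def badB (rules_dict : List (Int × List Int)) (job : List Int) : Bool :=
  let fo := firstOcc job
  (PySem.List.enumerate job).any (fun jp =>
    ((rules_dict.lookup jp.2).getD []).any (fun a =>
      fo.contains a && decide (fo.getD a 0 ≤ jp.1)))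

def determine_order_alt (rules_dict : List (Int × List Int)) (print_jobs : List (List Int)) : List (List Int) × List (List Int) :=
  print_jobs.foldl
    (fun acc job =>
      if badB rules_dict job then (acc.1, acc.2 ++ [job]) else (acc.1 ++ [job], acc.2))
    ([], [])

-- ===== PRECONDITION & SPEC =====
def Spec_determine_order (rules_dict : List (Int × List Int)) (print_jobs : List (List Int)) (out : List (List Int) × List (List Int)) : Prop := out = determine_order_alt rules_dict print_jobs
instance (rules_dict : List (Int × List Int)) (print_jobs : List (List Int)) (out : List (List Int) × List (List Int)) : Decidable (Spec_determine_order rules_dict print_jobs out) := by unfold Spec_determine_order; infer_instance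

-- ===== CLAIM (what is proved, stated in full; the proofs are below) =====
def Claim_equal_determine_order : Prop := ∀ (rules_dict : List (Int × List Int)) (print_jobs : List (List Int)), Dom_determine_order rules_dict print_jobs → Spec_determine_order rules_dict print_jobs (determine_order rules_dict print_jobs)

-- ===== LEMMAS AND PROOFS =====

-- 'x is listed in rules_dict[y]'
def hitB (rules_dict : List (Int × List Int)) (x y : Int) : Bool :=
  ((rules_dict.lookup y).getD []).contains x

def badSuffix (rules_dict : List (Int × List Int)) : List Int → Bool
  | [] => false
  | x :: rest => ((x :: rest).any (fun n => hitB rules_dict x n)) || badSuffix rules_dict rest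

-- the common characterisation: some earlier (or equal) page i is ruled after page j
def Qp (rules_dict : List (Int × List Int)) (job : List Int) : Prop :=
  ∃ j, ∃ hj : j < job.length, ∃ i, ∃ hi : i ≤ j,
    hitB rules_dict (job[i]'(Nat.lt_of_le_of_lt hi hj)) (job[j]) = true

lemma doInner_eq_any (rules_dict : List (Int × List Int)) (cur : Int) (l : List Int) :
    doInner rules_dict cur l = l.any (fun n => hitB rules_dict cur n) := by
  induction l with
  | nil => rfl
  | cons x rest ih =>
    simp only [doInner, List.any_cons, hitB]
    cases h : rules_dict.lookup x with
    | none => simp [ih, hitB]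
    | some vs =>
      by_cases hc : vs.contains cur <;> simp [ih, hitB]

lemma doOuter_eq_badSuffix (rules_dict : List (Int × List Int)) (job : List Int) (page : Nat) :
    doOuter rules_dict job page = badSuffix rules_dict (job.drop page) := by
  fun_induction doOuter rules_dict job page with
  | case1 page h hinner =>
    rw [List.drop_eq_getElem_cons h]
    simp only [badSuffix]
    rw [doInner_eq_any, List.drop_eq_getElem_cons h] at hinner
    rw [hinner, Bool.true_or]
  | case2 page h hinner ih =>
    rw [List.drop_eq_getElem_cons h]
    simp only [badSuffix]
    rw [doInner_eq_any, List.drop_eq_getElem_cons h] at hinner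
    rw [Bool.not_eq_true] at hinner
    rw [hinner, Bool.false_or]
    exact ih
  | case3 page h =>
    rw [List.drop_eq_nil_of_le (by omega)]
    rfl

lemma badSuffix_iff (rules_dict : List (Int × List Int)) (l : List Int) :
    badSuffix rules_dict l = true ↔ Qp rules_dict l := by
  induction l with
  | nil => simp [badSuffix, Qp]
  | cons x rest ih =>
    simp only [badSuffix, Bool.or_eq_true, List.any_eq_true, ih]
    constructor
    · rintro (⟨n, hn, hhit⟩ | ⟨j, hj, i, hi, hhit⟩)
      · obtain ⟨j, hj, rfl⟩ := List.mem_iff_getElem.mp hn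
        exact ⟨j, hj, 0, Nat.zero_le _, by simpa using hhit⟩
      · exact ⟨j + 1, by simpa using Nat.succ_lt_succ hj, i + 1, Nat.succ_le_succ hi,
          by simpa using hhit⟩
    · rintro ⟨j, hj, i, hi, hhit⟩
      cases i with
      | zero => exact Or.inl ⟨(x :: rest)[j], List.getElem_mem _, by simpa using hhit⟩
      | succ i' =>
        cases j with
        | zero => omega
        | succ j' =>
          exact Or.inr ⟨j', by simpa using hj, i', Nat.le_of_succ_le_succ hi,
            by simpa using hhit⟩

lemma firstOcc_get? (job : List Int) (a : Int) :
    (firstOcc job).get? a = if a ∈ job then some (job.idxOf a : Int) else none := by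
  have aux : ∀ (l : List Int) (s : Int) (d : PySem.Dict Int Int),
      ((PySem.List.enumerate l s).foldl
        (fun d p => if d.contains p.2 then d else d.insert p.2 p.1) d).get? a =
      if d.contains a then d.get? a
      else if a ∈ l then some (s + (l.idxOf a : Int)) else none := by
    intro l
    induction l with
    | nil =>
      intro s d
      simp only [PySem.List.enumerate_nil, List.foldl_nil, List.not_mem_nil, if_false]
      by_cases hc : d.contains a
      · simp [hc]
      · have hn : d.get? a = none := by
          rw [PySem.Dict.contains_eq_isSome_get?] at hc
          simpa using hc
        simp [hc, hn]
    | cons x rest ih =>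
      intro s d
      rw [PySem.List.enumerate_cons, List.foldl_cons]
      by_cases hdx : d.contains x
      · rw [if_pos hdx, ih]
        by_cases hda : d.contains a
        · simp [hda]
        · simp only [hda]
          by_cases hax : a = x
          · subst hax; exact absurd hdx (by simp [hda])
          · simp only [List.mem_cons, hax, false_or]
            by_cases har : a ∈ rest
            · rw [if_pos har, if_pos har, List.idxOf_cons_ne _ (by simpa using (Ne.symm hax))]
              push_cast; ring_nf
            · simp [har]
      · rw [if_neg hdx, ih]
        by_cases hax : a = x
        · subst hax
          rw [if_pos (PySem.Dict.contains_insert_self ..), PySem.Dict.get?_insert_self]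
          simp [hdx, List.idxOf_cons_self]
        · rw [PySem.Dict.contains_insert, PySem.Dict.get?_insert_of_ne _ _ hax]
          have : (a == x) = false := by simp [hax]
          rw [this, Bool.false_or]
          by_cases hda : d.contains a
          · simp [hda]
          · simp only [hda, List.mem_cons, hax, false_or]
            by_cases har : a ∈ rest
            · rw [if_pos har, if_pos har, List.idxOf_cons_ne _ (by simpa using (Ne.symm hax))]
              push_cast; ring_nf
            · simp [har]
  unfold firstOcc
  rw [aux]
  simp [PySem.Dict.contains_empty]

lemma badB_iff (rules_dict : List (Int × List Int)) (job : List Int) :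
    badB rules_dict job = true ↔ Qp rules_dict job := by
  have any_enum : ∀ {α : Type} (l : List α) (f : Int × α → Bool) (s : Int),
      (PySem.List.enumerate l s).any f = true ↔
        ∃ k, ∃ _ : k < l.length, f (s + (k : Int), l[k]) = true := by
    intro α l f
    induction l with
    | nil => intro s; simp [PySem.List.enumerate_nil]
    | cons x rest ih =>
      intro s
      rw [PySem.List.enumerate_cons, List.any_cons, Bool.or_eq_true, ih]
      constructor
      · rintro (h0 | ⟨k, hk, hf⟩)
        · exact ⟨0, by simp, by simpa using h0⟩
        · refine ⟨k + 1, by simpa using Nat.succ_lt_succ hk, ?_⟩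
          have : s + ((k : Int) + 1) = s + 1 + (k : Int) := by ring
          simpa [this] using hf
      · rintro ⟨k, hk, hf⟩
        cases k with
        | zero => exact Or.inl (by simpa using hf)
        | succ k' =>
          refine Or.inr ⟨k', by simpa using hk, ?_⟩
          have : s + ((k' : Int) + 1) = s + 1 + (k' : Int) := by ring
          simpa [this] using hf
  have idxOf_getElem_le : ∀ (l : List Int) (i : Nat) (h : i < l.length),
      l.idxOf l[i] ≤ i := by
    intro l
    induction l with
    | nil => intro i h; simp at h
    | cons x rest ih =>
      intro i h
      cases i with
      | zero => simp
      | succ i' =>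
        by_cases hx : (x :: rest)[i' + 1] = x
        · simp [hx]
        · rw [List.getElem_cons_succ] at hx ⊢
          rw [List.idxOf_cons_ne _ (by simpa using Ne.symm hx)]
          exact Nat.succ_le_succ (ih i' (by simpa using h))
  have hfo_contains : ∀ a, (firstOcc job).contains a = true ↔ a ∈ job := by
    intro a
    rw [PySem.Dict.contains_eq_isSome_get?, firstOcc_get?]
    by_cases h : a ∈ job <;> simp [h]
  have hfo_getD : ∀ a, a ∈ job → (firstOcc job).getD a 0 = (job.idxOf a : Int) := by
    intro a h
    rw [PySem.Dict.getD_eq_get?_getD, firstOcc_get?, if_pos h, Option.getD_some]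
  unfold badB
  rw [any_enum]
  constructor
  · rintro ⟨j, hj, hf⟩
    rw [List.any_eq_true] at hf
    obtain ⟨a, ha, hcond⟩ := hf
    rw [Bool.and_eq_true, decide_eq_true_iff] at hcond
    obtain ⟨hcont, hle⟩ := hcond
    have hmem : a ∈ job := (hfo_contains a).mp hcont
    rw [hfo_getD a hmem] at hle
    have hij : job.idxOf a ≤ j := by omega
    refine ⟨j, hj, job.idxOf a, hij, ?_⟩
    have hlt : job.idxOf a < job.length := List.idxOf_lt_length_of_mem hmem
    have : job[job.idxOf a]'(Nat.lt_of_le_of_lt hij hj) = a := List.getElem_idxOf hlt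
    rw [hitB]
    rw [this]
    simpa using ha
  · rintro ⟨j, hj, i, hi, hhit⟩
    refine ⟨j, hj, ?_⟩
    rw [List.any_eq_true]
    have hilt : i < job.length := Nat.lt_of_le_of_lt hi hj
    refine ⟨job[i], ?_, ?_⟩
    · rw [hitB] at hhit
      simpa using hhit
    · rw [Bool.and_eq_true, decide_eq_true_iff]
      have hmem : job[i] ∈ job := List.getElem_mem hilt
      refine ⟨(hfo_contains _).mpr hmem, ?_⟩
      rw [hfo_getD _ hmem]
      have := idxOf_getElem_le job i hilt
      omega

lemma bad_eq (rules_dict : List (Int × List Int)) (job : List Int) :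
    doOuter rules_dict job 0 = badB rules_dict job := by
  rw [doOuter_eq_badSuffix, List.drop_zero]
  rcases h : badB rules_dict job with _ | _
  · rcases hb : badSuffix rules_dict job with _ | _
    · rfl
    · exact absurd ((badB_iff ..).mpr ((badSuffix_iff ..).mp hb)) (by simp [h])
  · exact (badSuffix_iff ..).mpr ((badB_iff ..).mp h)

-- ===== VERDICT (by name: the statement is the Claim_ definition above) =====
theorem determine_order_spec : Claim_equal_determine_order := by
  intro rules_dict print_jobs _
  unfold Spec_determine_order determine_order determine_order_alt
  congr 1
  funext acc job
  rw [bad_eq]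
  cases badB rules_dict job <;> simp
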